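-- pv_equiv track=rewrite | github.com/lizhiqi233-rgb/nonebot-plugin-arkguesser | nonebot_plugin_arkguesser/resource_tools/char_art_match.py | _merge_spatial_dedupe
-- ===== SOURCE A (Python) =====
-- def _merge_spatial_dedupe(
--     lists: list[list[tuple[int, int]]],
--     min_sep: int,
--     max_out: int,
-- ) -> list[tuple[int, int]]:
--     """合并多路候选，去掉过近重复点，最多保留 max_out 个（先出现的优先）。"""
--     merged: list[tuple[int, int]] = []
--     thr = max(3, min_sep // 2)
--     for lst in lists:
--         for ly, lx in lst:
--             if any(max(abs(ly - py), abs(lx - px)) < thr for py, px in merged):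
--                 continue
--             merged.append((ly, lx))
--             if len(merged) >= max_out:
--                 return merged
--     return merged
-- ===== SOURCE B (Python) =====
-- def _merge_spatial_dedupe(
--     lists: list[list[tuple[int, int]]],
--     min_sep: int,
--     max_out: int,
-- ) -> list[tuple[int, int]]:
--     """Spatial-hash-grid variant: accepted points are bucketed by cell (side thr),
--     and a new point is compared only with points in its own and the 8
--     neighbouring cells."""
--     merged: list[tuple[int, int]] = []
--     thr = max(3, min_sep // 2)
--     grid: dict[tuple[int, int], list[tuple[int, int]]] = {}
--     for lst in lists:
--         for ly, lx in lst:
--             cy, cx = ly // thr, lx // thr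
--             if any(max(abs(ly - py), abs(lx - px)) < thr
--                    for dy in (-1, 0, 1)
--                    for dx in (-1, 0, 1)
--                    for py, px in grid.get((cy + dy, cx + dx), ())):
--                 continue
--             merged.append((ly, lx))
--             grid.setdefault((cy, cx), []).append((ly, lx))
--             if len(merged) >= max_out:
--                 return merged
--     return merged
-- ===== Notes on version B (the rewrite author's own statement) =====
-- stated objective: alternative
-- what changed: Replaces A's scan of the entire merged list per candidate with a spatial hash grid of cell side thr, so each candidate is compared only against accepted points bucketed in its own and the 8 neighbouring cells.
import Mathlib
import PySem

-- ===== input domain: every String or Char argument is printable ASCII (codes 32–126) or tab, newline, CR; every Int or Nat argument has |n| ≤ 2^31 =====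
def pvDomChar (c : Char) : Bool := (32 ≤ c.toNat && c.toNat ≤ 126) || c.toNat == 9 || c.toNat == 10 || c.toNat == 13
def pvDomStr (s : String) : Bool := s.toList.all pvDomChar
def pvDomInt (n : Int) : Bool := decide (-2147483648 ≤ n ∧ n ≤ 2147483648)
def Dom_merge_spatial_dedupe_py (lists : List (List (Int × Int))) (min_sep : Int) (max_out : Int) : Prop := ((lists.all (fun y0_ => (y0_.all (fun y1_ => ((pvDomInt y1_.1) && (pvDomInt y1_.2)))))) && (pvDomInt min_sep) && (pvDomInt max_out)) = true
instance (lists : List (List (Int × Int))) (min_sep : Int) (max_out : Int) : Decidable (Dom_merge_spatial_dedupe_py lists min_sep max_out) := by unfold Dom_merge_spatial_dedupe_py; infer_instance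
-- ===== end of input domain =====

-- B replaces A's scan of the whole accepted list per candidate by a spatial hash grid
-- with cell side thr: each candidate is compared only with accepted points stored in its
-- own and the 8 neighbouring cells (objective: alternative algorithm, same results).

-- ===== PORT A =====
-- inner 'for ly, lx in lst' loop; Bool = the early 'return' was taken
def pvInnerA (thr max_out : Int) : List (Int × Int) → List (Int × Int) → List (Int × Int) × Bool
  | [], merged => (merged, false)
  | (ly, lx) :: rest, merged =>
    if merged.any (fun q => decide (max |ly - q.1| |lx - q.2| < thr)) then
      pvInnerA thr max_out rest merged
    else
      let merged' := merged ++ [(ly, lx)]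
      if max_out ≤ (merged'.length : Int) then (merged', true)
      else pvInnerA thr max_out rest merged'

-- outer 'for lst in lists' loop
def pvOuterA (thr max_out : Int) : List (List (Int × Int)) → List (Int × Int) → List (Int × Int)
  | [], merged => merged
  | lst :: rest, merged =>
    let r := pvInnerA thr max_out lst merged
    if r.2 then r.1 else pvOuterA thr max_out rest r.1

def merge_spatial_dedupe_py (lists : List (List (Int × Int))) (min_sep : Int) (max_out : Int) : List (Int × Int) :=
  pvOuterA (max 3 (PySem.Int.floordiv min_sep 2)) max_out lists []

-- ===== PORT B =====
-- the generator 'any(... for dy in (-1,0,1) for dx in (-1,0,1) for py,px in grid.get(...,()))'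
def pvNearB (thr : Int) (grid : PySem.Dict (Int × Int) (List (Int × Int))) (ly lx cy cx : Int) : Bool :=
  [(-1 : Int), 0, 1].any fun dy =>
    [(-1 : Int), 0, 1].any fun dx =>
      ((grid.get? (cy + dy, cx + dx)).getD []).any fun q =>
        decide (max |ly - q.1| |lx - q.2| < thr)

-- inner loop of B: state = (merged, grid); Bool = early return taken
def pvInnerB (thr max_out : Int) : List (Int × Int) → List (Int × Int) →
    PySem.Dict (Int × Int) (List (Int × Int)) →
    List (Int × Int) × PySem.Dict (Int × Int) (List (Int × Int)) × Bool
  | [], merged, grid => (merged, grid, false)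
  | (ly, lx) :: rest, merged, grid =>
    let cy := PySem.Int.floordiv ly thr
    let cx := PySem.Int.floordiv lx thr
    if pvNearB thr grid ly lx cy cx then
      pvInnerB thr max_out rest merged grid
    else
      let merged' := merged ++ [(ly, lx)]
      let grid' := grid.insert (cy, cx) (((grid.get? (cy, cx)).getD []) ++ [(ly, lx)])
      if max_out ≤ (merged'.length : Int) then (merged', grid', true)
      else pvInnerB thr max_out rest merged' grid'

def pvOuterB (thr max_out : Int) : List (List (Int × Int)) → List (Int × Int) →
    PySem.Dict (Int × Int) (List (Int × Int)) → List (Int × Int)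
  | [], merged, _ => merged
  | lst :: rest, merged, grid =>
    let r := pvInnerB thr max_out lst merged grid
    if r.2.2 then r.1 else pvOuterB thr max_out rest r.1 r.2.1

def merge_spatial_dedupe_py_alt (lists : List (List (Int × Int))) (min_sep : Int) (max_out : Int) : List (Int × Int) :=
  pvOuterB (max 3 (PySem.Int.floordiv min_sep 2)) max_out lists [] PySem.Dict.empty

-- ===== PRECONDITION & SPEC =====
def Spec_merge_spatial_dedupe_py (lists : List (List (Int × Int))) (min_sep : Int) (max_out : Int) (out : List (Int × Int)) : Prop := out = merge_spatial_dedupe_py_alt lists min_sep max_out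
instance (lists : List (List (Int × Int))) (min_sep : Int) (max_out : Int) (out : List (Int × Int)) : Decidable (Spec_merge_spatial_dedupe_py lists min_sep max_out out) := by unfold Spec_merge_spatial_dedupe_py; infer_instance

-- ===== CLAIM (what is proved, stated in full; the proofs are below) =====
def Claim_equal_merge_spatial_dedupe_py : Prop := ∀ (lists : List (List (Int × Int))) (min_sep : Int) (max_out : Int), Dom_merge_spatial_dedupe_py lists min_sep max_out → Spec_merge_spatial_dedupe_py lists min_sep max_out (merge_spatial_dedupe_py lists min_sep max_out)

-- ===== LEMMAS AND PROOFS =====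

-- the grid cell of a point
def pvCell (thr : Int) (q : Int × Int) : Int × Int :=
  (PySem.Int.floordiv q.1 thr, PySem.Int.floordiv q.2 thr)

-- grid invariant: buckets hold exactly the accepted points, each under its own cell key
def pvInv (thr : Int) (merged : List (Int × Int))
    (grid : PySem.Dict (Int × Int) (List (Int × Int))) : Prop :=
  (∀ c q, q ∈ (grid.get? c).getD [] → q ∈ merged ∧ c = pvCell thr q) ∧
  (∀ q ∈ merged, q ∈ (grid.get? (pvCell thr q)).getD [])

-- points less than thr apart lie in the same or adjacent cells
lemma pv_fdiv_near (thr a b : Int) (hthr : 0 < thr) (h : |a - b| < thr) :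
    PySem.Int.floordiv a thr - 1 ≤ PySem.Int.floordiv b thr ∧
    PySem.Int.floordiv b thr ≤ PySem.Int.floordiv a thr + 1 := by
  rw [PySem.Int.floordiv_eq_ediv_of_pos hthr, PySem.Int.floordiv_eq_ediv_of_pos hthr]
  rw [abs_lt] at h
  have hadd : ∀ x : Int, (x + thr) / thr = x / thr + 1 := by
    intro x
    have := Int.add_mul_ediv_right x 1 (ne_of_gt hthr)
    simpa using this
  constructor
  · have h1 : a ≤ b + thr := by omega
    have := Int.ediv_le_ediv hthr h1
    rw [hadd b] at this; omega
  · have h1 : b ≤ a + thr := by omega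
    have := Int.ediv_le_ediv hthr h1
    rw [hadd a] at this; omega

-- under the invariant, B's 9-bucket test computes exactly A's full-scan test
lemma pv_near_eq (thr : Int) (hthr : 0 < thr) (merged : List (Int × Int))
    (grid : PySem.Dict (Int × Int) (List (Int × Int))) (hinv : pvInv thr merged grid)
    (ly lx : Int) :
    pvNearB thr grid ly lx (PySem.Int.floordiv ly thr) (PySem.Int.floordiv lx thr) =
      merged.any (fun q => decide (max |ly - q.1| |lx - q.2| < thr)) := by
  obtain ⟨h1, h2⟩ := hinv
  apply Bool.eq_iff_iff.mpr
  simp only [pvNearB, List.any_eq_true, decide_eq_true_eq]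
  constructor
  · rintro ⟨dy, -, dx, -, q, hq, hlt⟩
    exact ⟨q, (h1 _ q hq).1, hlt⟩
  · rintro ⟨q, hq, hlt⟩
    have hy := pv_fdiv_near thr ly q.1 hthr (by have := le_max_left |ly - q.1| |lx - q.2|; omega)
    have hx := pv_fdiv_near thr lx q.2 hthr (by have := le_max_right |ly - q.1| |lx - q.2|; omega)
    refine ⟨PySem.Int.floordiv q.1 thr - PySem.Int.floordiv ly thr, ?_,
            PySem.Int.floordiv q.2 thr - PySem.Int.floordiv lx thr, ?_, q, ?_, hlt⟩
    · simp only [List.mem_cons]; omega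
    · simp only [List.mem_cons]; omega
    · have := h2 q hq
      simpa [pvCell] using this

-- accepting a point preserves the invariant
lemma pv_inv_insert (thr : Int) (merged : List (Int × Int))
    (grid : PySem.Dict (Int × Int) (List (Int × Int))) (hinv : pvInv thr merged grid)
    (ly lx : Int) :
    pvInv thr (merged ++ [(ly, lx)])
      (grid.insert (PySem.Int.floordiv ly thr, PySem.Int.floordiv lx thr)
        (((grid.get? (PySem.Int.floordiv ly thr, PySem.Int.floordiv lx thr)).getD []) ++ [(ly, lx)])) := by
  obtain ⟨h1, h2⟩ := hinv
  set c : Int × Int := (PySem.Int.floordiv ly thr, PySem.Int.floordiv lx thr) with hc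
  have hcell : pvCell thr (ly, lx) = c := by simp [pvCell, hc]
  constructor
  · intro c' q hq
    rw [PySem.Dict.get?_insert] at hq
    by_cases hcc : c' = c
    · rw [if_pos hcc] at hq
      simp only [Option.getD_some] at hq
      rcases List.mem_append.mp hq with hq | hq
      · exact ⟨List.mem_append_left _ (h1 _ q hq).1, hcc.trans (h1 _ q hq).2⟩
      · rw [List.mem_singleton] at hq; subst hq
        exact ⟨List.mem_append_right _ (List.mem_singleton_self _), hcc.trans hcell.symm⟩
    · rw [if_neg hcc] at hq
      exact ⟨List.mem_append_left _ (h1 _ q hq).1, (h1 _ q hq).2⟩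
  · intro q hq
    rcases List.mem_append.mp hq with hq | hq
    · rw [PySem.Dict.get?_insert]
      by_cases hcc : pvCell thr q = c
      · rw [if_pos hcc]
        simp only [Option.getD_some]
        refine List.mem_append_left _ ?_
        have := h2 q hq; rw [hcc] at this; exact this
      · rw [if_neg hcc]; exact h2 q hq
    · rw [List.mem_singleton] at hq; subst hq
      rw [hcell, PySem.Dict.get?_insert, if_pos rfl, Option.getD_some]
      exact List.mem_append_right _ (List.mem_singleton_self _)

-- joint simulation of the inner loops
lemma pv_inner_eq (thr max_out : Int) (hthr : 0 < thr) :
    ∀ (lst merged : List (Int × Int)) (grid : PySem.Dict (Int × Int) (List (Int × Int))),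
      pvInv thr merged grid →
      (pvInnerB thr max_out lst merged grid).1 = (pvInnerA thr max_out lst merged).1 ∧
      (pvInnerB thr max_out lst merged grid).2.2 = (pvInnerA thr max_out lst merged).2 ∧
      pvInv thr (pvInnerB thr max_out lst merged grid).1 (pvInnerB thr max_out lst merged grid).2.1
  | [], merged, grid, hinv => ⟨rfl, rfl, by simpa [pvInnerB] using hinv⟩
  | (ly, lx) :: rest, merged, grid, hinv => by
    rw [pvInnerA, pvInnerB]
    simp only []
    rw [pv_near_eq thr hthr merged grid hinv ly lx]
    by_cases hnear : merged.any (fun q => decide (max |ly - q.1| |lx - q.2| < thr)) = true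
    · rw [if_pos hnear, if_pos hnear]
      exact pv_inner_eq thr max_out hthr rest merged grid hinv
    · rw [if_neg hnear, if_neg hnear]
      have hinv' := pv_inv_insert thr merged grid hinv ly lx
      by_cases hlen : max_out ≤ ((merged ++ [(ly, lx)]).length : Int)
      · rw [if_pos hlen, if_pos hlen]
        exact ⟨rfl, rfl, hinv'⟩
      · rw [if_neg hlen, if_neg hlen]
        exact pv_inner_eq thr max_out hthr rest (merged ++ [(ly, lx)]) _ hinv'

-- joint simulation of the outer loops
lemma pv_outer_eq (thr max_out : Int) (hthr : 0 < thr) :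
    ∀ (lists : List (List (Int × Int))) (merged : List (Int × Int))
      (grid : PySem.Dict (Int × Int) (List (Int × Int))),
      pvInv thr merged grid →
      pvOuterB thr max_out lists merged grid = pvOuterA thr max_out lists merged
  | [], _, _, _ => rfl
  | lst :: rest, merged, grid, hinv => by
    rw [pvOuterA, pvOuterB]
    obtain ⟨he, hd, hinv'⟩ := pv_inner_eq thr max_out hthr lst merged grid hinv
    rw [he] at hinv'
    rw [hd, he]
    by_cases hfl : (pvInnerA thr max_out lst merged).2 = true
    · rw [if_pos hfl, if_pos hfl]
    · rw [if_neg hfl, if_neg hfl]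
      exact pv_outer_eq thr max_out hthr rest _ _ hinv'

-- ===== VERDICT (by name: the statement is the Claim_ definition above) =====
theorem merge_spatial_dedupe_py_spec : Claim_equal_merge_spatial_dedupe_py := by
  intro lists min_sep max_out _
  unfold Spec_merge_spatial_dedupe_py merge_spatial_dedupe_py merge_spatial_dedupe_py_alt
  have hthr : (0 : Int) < max 3 (PySem.Int.floordiv min_sep 2) := lt_of_lt_of_le (by norm_num) (le_max_left _ _)
  exact (pv_outer_eq _ max_out hthr lists [] PySem.Dict.empty
    ⟨by intro c q hq; simp [PySem.Dict.get?_empty] at hq, by intro q hq; simp at hq⟩).symm
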